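-- pv_equiv track=rewrite | github.com/NickIsThere/Monte_Carlo_Cluster_LP | src/lpas/solver/parallel_solver.py | _chunk_sizes
-- ===== SOURCE A (Python) =====
-- def _chunk_sizes(total: int, chunk_size: int) -> list[int]:
--     chunks: list[int] = []
--     remaining = total
--     while remaining > 0:
--         current = min(chunk_size, remaining)
--         chunks.append(current)
--         remaining -= current
--     return chunks
-- ===== SOURCE B (Python) =====
-- def _chunk_sizes(total: int, chunk_size: int) -> list[int]:
--     if total <= 0:
--         return []
--     k, r = divmod(total, chunk_size)
--     return [chunk_size] * k + ([r] if r else [])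
-- ===== Notes on version B (the rewrite author's own statement) =====
-- stated objective: simpler
-- what changed: Replaces the repeated-subtraction accumulation loop with a closed-form divmod split: k full chunks plus an optional remainder chunk.
import Mathlib
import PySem

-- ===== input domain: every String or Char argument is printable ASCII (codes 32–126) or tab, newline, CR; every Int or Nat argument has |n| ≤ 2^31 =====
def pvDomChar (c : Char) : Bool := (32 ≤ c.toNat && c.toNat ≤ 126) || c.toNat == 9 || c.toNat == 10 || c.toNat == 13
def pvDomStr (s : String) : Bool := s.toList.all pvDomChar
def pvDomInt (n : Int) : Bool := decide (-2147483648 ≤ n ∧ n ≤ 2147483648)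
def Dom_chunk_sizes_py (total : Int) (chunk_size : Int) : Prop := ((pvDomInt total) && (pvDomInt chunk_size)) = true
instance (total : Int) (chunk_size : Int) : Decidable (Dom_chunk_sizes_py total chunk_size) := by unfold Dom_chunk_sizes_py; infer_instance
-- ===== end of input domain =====

-- B replaces A's repeated-subtraction loop with a closed-form divmod split (simpler decomposition).


-- ===== PORT A =====
-- the while-loop, with fuel making the recursion total; inside Pre_ the fuel never runs out
def chunkLoopA (fuel : Nat) (chunk_size remaining : Int) (chunks : List Int) : List Int :=
  match fuel with
  | 0 => chunks
  | fuel + 1 =>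
    if remaining > 0 then
      let current := min chunk_size remaining
      chunkLoopA fuel chunk_size (remaining - current) (chunks ++ [current])
    else chunks

def chunk_sizes_py (total : Int) (chunk_size : Int) : List Int :=
  chunkLoopA (total.toNat + 1) chunk_size total []

-- ===== PORT B =====
def chunk_sizes_py_alt (total : Int) (chunk_size : Int) : List Int :=
  if total ≤ 0 then []
  else
    match PySem.Int.divmod? total chunk_size with
    | none => []  -- ZeroDivisionError (chunk_size = 0), outside Pre_
    | some (k, r) =>
      List.replicate k.toNat chunk_size ++ (if r ≠ 0 then [r] else [])

-- ===== PRECONDITION & SPEC =====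
-- Pre_ excludes exactly the inputs (total > 0 with chunk_size ≤ 0) where A's loop never terminates.
def Pre_chunk_sizes_py (total : Int) (chunk_size : Int) : Prop := total ≤ 0 ∨ 0 < chunk_size
instance (total : Int) (chunk_size : Int) : Decidable (Pre_chunk_sizes_py total chunk_size) := by unfold Pre_chunk_sizes_py; infer_instance
def pvWitness_chunk_sizes_py : Int × Int := (10, 3)
def Spec_chunk_sizes_py (total : Int) (chunk_size : Int) (out : List Int) : Prop := out = chunk_sizes_py_alt total chunk_size
instance (total : Int) (chunk_size : Int) (out : List Int) : Decidable (Spec_chunk_sizes_py total chunk_size out) := by unfold Spec_chunk_sizes_py; infer_instance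

-- ===== CLAIM (what is proved, stated in full; the proofs are below) =====
def Claim_equal_chunk_sizes_py : Prop := ∀ (total : Int) (chunk_size : Int), Dom_chunk_sizes_py total chunk_size → Pre_chunk_sizes_py total chunk_size → Spec_chunk_sizes_py total chunk_size (chunk_sizes_py total chunk_size)

-- ===== LEMMAS AND PROOFS =====

-- closed form of B as a function of the loop state
def altForm (remaining chunk_size : Int) : List Int :=
  chunk_sizes_py_alt remaining chunk_size

theorem altForm_nonpos (remaining chunk_size : Int) (h : remaining ≤ 0) :
    altForm remaining chunk_size = [] := by
  simp [altForm, chunk_sizes_py_alt, h]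

theorem divmod?_pos (a b : Int) (hb : 0 < b) :
    PySem.Int.divmod? a b = some (a / b, a % b) := by
  simp [PySem.Int.divmod?, show b ≠ 0 by omega, Int.fdiv_eq_ediv, Int.fmod_eq_emod, hb.le]

theorem altForm_small (remaining chunk_size : Int) (h0 : 0 < remaining) (h : remaining < chunk_size) :
    altForm remaining chunk_size = [remaining] := by
  have hb : (0:Int) < chunk_size := by omega
  have hq : remaining / chunk_size = 0 := Int.ediv_eq_zero_of_lt (by omega) h
  have hr : remaining % chunk_size = remaining := Int.emod_eq_of_lt (by omega) h
  unfold altForm chunk_sizes_py_alt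
  rw [if_neg (by omega), divmod?_pos _ _ hb]
  simp [hq, hr, show remaining ≠ 0 by omega]

theorem altForm_step (remaining chunk_size : Int) (hc : 0 < chunk_size) (h : chunk_size ≤ remaining) :
    altForm remaining chunk_size = chunk_size :: altForm (remaining - chunk_size) chunk_size := by
  have hq1 : remaining / chunk_size = (remaining - chunk_size) / chunk_size + 1 := by
    have h1 := Int.add_mul_ediv_right (remaining - chunk_size) 1 (show chunk_size ≠ 0 by omega)
    rw [show remaining - chunk_size + 1 * chunk_size = remaining by ring] at h1
    omega
  have hrr : remaining % chunk_size = (remaining - chunk_size) % chunk_size := by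
    have h2 := Int.add_mul_emod_self_left (a := remaining - chunk_size) (b := chunk_size) (c := 1)
    rw [show remaining - chunk_size + chunk_size * 1 = remaining by ring] at h2
    omega
  have hq'nn : 0 ≤ (remaining - chunk_size) / chunk_size :=
    Int.ediv_nonneg (by omega) (by omega)
  by_cases hrem : remaining - chunk_size ≤ 0
  · have heq : remaining = chunk_size := by omega
    subst heq
    rw [show remaining - remaining = 0 by ring, altForm_nonpos 0 _ le_rfl]
    unfold altForm chunk_sizes_py_alt
    rw [if_neg (by omega), divmod?_pos _ _ hc,
      Int.ediv_self (show remaining ≠ 0 by omega)]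
    simp
  · have hkt : (remaining / chunk_size).toNat = ((remaining - chunk_size) / chunk_size).toNat + 1 := by
      omega
    unfold altForm chunk_sizes_py_alt
    rw [if_neg (by omega), if_neg (by omega), divmod?_pos _ _ hc, divmod?_pos _ _ hc]
    simp only [hkt, hrr, List.replicate_succ, List.cons_append]

theorem loopA_eq (fuel : Nat) :
    ∀ (remaining chunk_size : Int) (acc : List Int), 0 < chunk_size → remaining.toNat < fuel →
      chunkLoopA fuel chunk_size remaining acc = acc ++ altForm remaining chunk_size := by
  induction fuel with
  | zero => intro r c a _ h; omega
  | succ f ih =>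
    intro remaining chunk_size acc hc hf
    by_cases hpos : remaining > 0
    · have hcur : (0:Int) < min chunk_size remaining := by omega
      have hdec : (remaining - min chunk_size remaining).toNat < f := by omega
      rw [chunkLoopA, if_pos hpos, ih _ _ _ hc hdec]
      by_cases hle : chunk_size ≤ remaining
      · rw [altForm_step remaining chunk_size hc hle]
        simp [min_eq_left hle]
      · have hmin : min chunk_size remaining = remaining := by omega
        rw [altForm_small remaining chunk_size hpos (by omega), hmin,
          show remaining - remaining = 0 by ring, altForm_nonpos 0 chunk_size le_rfl]
        simp
    · rw [chunkLoopA, if_neg hpos, altForm_nonpos _ _ (by omega)]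
      simp

-- ===== VERDICT (by name: the statement is the Claim_ definition above) =====
theorem chunk_sizes_py_spec : Claim_equal_chunk_sizes_py := by
  intro total chunk_size _ hpre
  unfold Spec_chunk_sizes_py chunk_sizes_py
  rcases hpre with h | h
  · rw [chunkLoopA, if_neg (by omega)]
    simp [chunk_sizes_py_alt, h]
  · rw [loopA_eq _ _ _ _ h (by omega)]
    simp [altForm]
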